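-- pv_equiv track=rewrite | github.com/DwijanX/CuatelaInteligente | Src/playDecider.py | __checkFirstWinCond
-- ===== SOURCE A (Python) =====
-- def __checkFirstWinCond(playerCoords, dim):
--     utility=0
--     won=True
--     coincidences=0
--     for playerCoord in playerCoords:
--         if playerCoord[0]==0 and (playerCoord[1]==0 or playerCoord[1]==dim-1) or playerCoord[0]==dim-1 and (playerCoord[1]==0 or playerCoord[1]==dim-1):
--             utility+=1*coincidences
--             coincidences+=1
--         else:
--             won=False
--     return won,utility
-- ===== SOURCE B (Python) =====
-- def __checkFirstWinCond(playerCoords, dim):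
--     corners = sum(1 for pc in playerCoords
--                   if pc[0]==0 and (pc[1]==0 or pc[1]==dim-1)
--                   or pc[0]==dim-1 and (pc[1]==0 or pc[1]==dim-1))
--     return corners == len(playerCoords), corners*(corners-1)//2
-- ===== Notes on version B (the rewrite author's own statement) =====
-- stated objective: simpler
-- what changed: B counts the corner coordinates once and replaces the running 'coincidences' accumulator with the closed-form triangular number corners*(corners-1)//2, with won = corners == len(playerCoords).
import Mathlib
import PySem

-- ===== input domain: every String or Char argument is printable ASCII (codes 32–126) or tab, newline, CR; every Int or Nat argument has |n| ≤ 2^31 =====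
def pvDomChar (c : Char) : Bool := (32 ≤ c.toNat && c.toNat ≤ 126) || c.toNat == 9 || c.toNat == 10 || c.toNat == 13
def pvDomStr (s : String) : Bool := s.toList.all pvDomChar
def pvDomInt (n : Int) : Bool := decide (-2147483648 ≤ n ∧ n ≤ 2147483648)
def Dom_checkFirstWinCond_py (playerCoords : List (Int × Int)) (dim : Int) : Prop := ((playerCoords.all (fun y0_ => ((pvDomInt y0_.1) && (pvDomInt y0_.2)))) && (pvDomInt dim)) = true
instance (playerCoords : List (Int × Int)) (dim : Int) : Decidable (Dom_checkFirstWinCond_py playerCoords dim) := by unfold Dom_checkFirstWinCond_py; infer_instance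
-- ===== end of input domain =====

-- B replaces A's running 'coincidences' accumulator by a one-pass corner count and the
-- closed-form triangular number corners*(corners-1)//2 (objective: simpler).

-- the corner test, identical in both Pythons (A's if-condition, B's generator condition)
def pvIsCorner (p : Int × Int) (dim : Int) : Bool :=
  (p.1 == 0 && (p.2 == 0 || p.2 == dim - 1)) || (p.1 == dim - 1 && (p.2 == 0 || p.2 == dim - 1))

-- ===== PORT A =====
-- loop state (won, utility, coincidences), updated exactly as A's for-loop does
def checkFirstWinCond_py (playerCoords : List (Int × Int)) (dim : Int) : Bool × Int :=
  let s := playerCoords.foldl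
    (fun (st : Bool × Int × Int) p =>
      if pvIsCorner p dim then (st.1, st.2.1 + 1 * st.2.2, st.2.2 + 1)
      else (false, st.2.1, st.2.2))
    (true, 0, 0)
  (s.1, s.2.1)

-- ===== PORT B =====
def checkFirstWinCond_py_alt (playerCoords : List (Int × Int)) (dim : Int) : Bool × Int :=
  let corners : Int := ((playerCoords.countP (fun p => pvIsCorner p dim)) : Int)
  (corners == (playerCoords.length : Int), PySem.Int.floordiv (corners * (corners - 1)) 2)

-- ===== PRECONDITION & SPEC =====
def Spec_checkFirstWinCond_py (playerCoords : List (Int × Int)) (dim : Int) (out : Bool × Int) : Prop := out = checkFirstWinCond_py_alt playerCoords dim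
instance (playerCoords : List (Int × Int)) (dim : Int) (out : Bool × Int) : Decidable (Spec_checkFirstWinCond_py playerCoords dim out) := by unfold Spec_checkFirstWinCond_py; infer_instance

-- ===== CLAIM (what is proved, stated in full; the proofs are below) =====
def Claim_equal_checkFirstWinCond_py : Prop := ∀ (playerCoords : List (Int × Int)) (dim : Int), Dom_checkFirstWinCond_py playerCoords dim → Spec_checkFirstWinCond_py playerCoords dim (checkFirstWinCond_py playerCoords dim)

-- ===== LEMMAS AND PROOFS =====

-- triangular number over Nat (exact, since k*(k-1) is even)
def pvTri (k : Nat) : Int := ((k * (k - 1)) / 2 : Nat)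

theorem pvTri_succ (k : Nat) : pvTri (k + 1) = pvTri k + k := by
  unfold pvTri
  obtain ⟨m, hm⟩ : 2 ∣ k * (k - 1) := (Nat.even_mul_pred_self k).two_dvd
  have hexp : (k + 1) * (k + 1 - 1) = k * (k - 1) + 2 * k := by
    cases k with
    | zero => simp
    | succ n => simp only [Nat.add_sub_cancel]; ring
  have hdiv : (k + 1) * (k + 1 - 1) / 2 = k * (k - 1) / 2 + k := by omega
  rw [hdiv]; push_cast; ring

-- A's loop, characterised: the fold from any state (won, util, c)
theorem loopA_spec (dim : Int) (coords : List (Int × Int)) :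
    ∀ (won : Bool) (util c : Int),
    coords.foldl
      (fun (st : Bool × Int × Int) p =>
        if pvIsCorner p dim then (st.1, st.2.1 + 1 * st.2.2, st.2.2 + 1)
        else (false, st.2.1, st.2.2))
      (won, util, c)
    = (won && coords.all (fun p => pvIsCorner p dim),
       util + (coords.countP (fun p => pvIsCorner p dim)) * c
            + pvTri (coords.countP (fun p => pvIsCorner p dim)),
       c + (coords.countP (fun p => pvIsCorner p dim))) := by
  induction coords with
  | nil => intro won util c; simp [pvTri]
  | cons p rest ih =>
    intro won util c
    simp only [List.foldl_cons, List.all_cons, List.countP_cons]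
    by_cases h : pvIsCorner p dim = true
    · rw [if_pos h, ih]
      simp only [h, Prod.mk.injEq, if_pos]
      refine ⟨by simp, ?_, ?_⟩
      · rw [pvTri_succ]; push_cast; ring
      · push_cast; ring
    · rw [if_neg h, ih]
      simp only [Bool.not_eq_true] at h
      simp only [h, Prod.mk.injEq, Bool.false_eq_true, if_false]
      refine ⟨by simp, by push_cast; ring, by push_cast; ring⟩

theorem pvTri_eq_floordiv (k : Nat) :
    pvTri k = PySem.Int.floordiv ((k : Int) * ((k : Int) - 1)) 2 := by
  cases k with
  | zero => simp [pvTri, PySem.Int.floordiv]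
  | succ n =>
    unfold pvTri
    have h1 : ((n + 1 : Nat) : Int) * (((n + 1 : Nat) : Int) - 1) = (((n + 1) * n : Nat) : Int) := by
      push_cast; ring
    rw [h1, show (2 : Int) = ((2 : Nat) : Int) from rfl, PySem.Int.floordiv_natCast]
    simp

-- ===== VERDICT (by name: the statement is the Claim_ definition above) =====
theorem checkFirstWinCond_py_spec : Claim_equal_checkFirstWinCond_py := by
  intro playerCoords dim _
  unfold Spec_checkFirstWinCond_py checkFirstWinCond_py checkFirstWinCond_py_alt
  rw [loopA_spec]
  simp only [Prod.mk.injEq]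
  constructor
  · -- won: all ↔ count = length
    rcases Bool.eq_false_or_eq_true (playerCoords.all (fun p => pvIsCorner p dim)) with h | h
    · have hc : playerCoords.countP (fun p => pvIsCorner p dim) = playerCoords.length :=
        List.countP_eq_length.mpr (fun a ha => (List.all_eq_true.mp h) a ha)
      simp [h, hc]
    · obtain ⟨x, hx, hpx⟩ := List.all_eq_false.mp h
      have hne : playerCoords.countP (fun p => pvIsCorner p dim) ≠ playerCoords.length := by
        intro hc
        exact hpx (List.countP_eq_length.mp hc x hx)
      simp only [h, Bool.and_false]
      have : ((playerCoords.countP (fun p => pvIsCorner p dim) : Int)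
              = (playerCoords.length : Int)) = False := by
        simp only [eq_iff_iff, iff_false]
        exact_mod_cast hne
      simp [this]
  · rw [pvTri_eq_floordiv]; ring_nf
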